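-- pv_equiv track=rewrite | github.com/Tejasvaidya10/GTHack | core/risk_scoring.py | _scan_text_for_keywords
-- ===== SOURCE A (Python) =====
-- def _scan_text_for_keywords(text: str, keywords: list[str]) -> list[tuple[str, str]]:
--     """Scan text for keyword matches, return list of (keyword, evidence_snippet)."""
--     text_lower = text.lower()
--     matches = []
--     for keyword in keywords:
--         idx = text_lower.find(keyword.lower())
--         if idx != -1:
--             # Extract surrounding context as evidence
--             start = max(0, idx - 40)
--             end = min(len(text), idx + len(keyword) + 40)
--             evidence = text[start:end].strip()
--             if start > 0:
--                 evidence = "..." + evidence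
--             if end < len(text):
--                 evidence = evidence + "..."
--             matches.append((keyword, evidence))
--     return matches
-- ===== SOURCE B (Python) =====
-- def _snippet(text: str, keyword: str, idx: int) -> str:
--     start = max(0, idx - 40)
--     end = min(len(text), idx + len(keyword) + 40)
--     evidence = text[start:end].strip()
--     if start > 0:
--         evidence = "..." + evidence
--     if end < len(text):
--         evidence = evidence + "..."
--     return evidence
--
--
-- def _scan_text_for_keywords(text: str, keywords: list[str]) -> list[tuple[str, str]]:
--     """One left-to-right pass over the text records the first hit of every
--     distinct lowered keyword; snippets are then built per keyword in order."""
--     text_lower = text.lower()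
--     pending = {k.lower() for k in keywords}
--     first = {}
--     for i in range(len(text_lower) + 1):
--         if not pending:
--             break
--         hits = [k for k in pending if text_lower.startswith(k, i)]
--         for k in hits:
--             first[k] = i
--             pending.discard(k)
--     out = []
--     for keyword in keywords:
--         idx = first.get(keyword.lower())
--         if idx is not None:
--             out.append((keyword, _snippet(text, keyword, idx)))
--     return out
-- ===== Notes on version B (the rewrite author's own statement) =====
-- stated objective: alternative
-- what changed: Instead of calling find once per keyword (each find rescanning the text), B makes a single left-to-right pass over the lowered text, recording the first match position of every distinct lowered keyword in a dict and stopping once all are found; snippets are then built per keyword from the recorded positions.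
import Mathlib
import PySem

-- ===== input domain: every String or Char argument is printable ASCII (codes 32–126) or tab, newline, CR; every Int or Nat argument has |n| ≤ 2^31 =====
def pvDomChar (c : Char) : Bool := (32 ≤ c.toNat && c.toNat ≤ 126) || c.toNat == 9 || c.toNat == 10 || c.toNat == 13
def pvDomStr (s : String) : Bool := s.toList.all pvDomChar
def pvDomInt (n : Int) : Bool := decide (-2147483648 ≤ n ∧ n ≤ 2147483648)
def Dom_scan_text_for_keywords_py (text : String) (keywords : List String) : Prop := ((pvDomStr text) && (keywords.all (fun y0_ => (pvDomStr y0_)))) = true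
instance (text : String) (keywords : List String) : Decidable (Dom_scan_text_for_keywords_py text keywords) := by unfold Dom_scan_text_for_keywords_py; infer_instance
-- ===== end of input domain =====

-- B replaces per-keyword find calls by one left-to-right scan of the lowered text that
-- records the first match position of every distinct lowered keyword (objective: alternative).


-- ===== PORT A =====
def scan_text_for_keywords_py (text : String) (keywords : List String) : List (String × String) :=
  let text_lower := PySem.Chars.lower text.toList
  keywords.foldl (fun acc keyword =>
    let idx := PySem.Chars.find text_lower (PySem.Chars.lower keyword.toList)
    if idx ≠ -1 then
      let start := max (0 : Int) (idx - 40)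
      let stop := min ((text.toList.length : Int)) (idx + (keyword.toList.length : Int) + 40)
      let evidence := PySem.Chars.strip (PySem.Chars.slice text.toList (some start) (some stop))
      let evidence := if start > 0 then ['.', '.', '.'] ++ evidence else evidence
      let evidence := if stop < (text.toList.length : Int) then evidence ++ ['.', '.', '.'] else evidence
      acc ++ [(keyword, String.ofList evidence)]
    else acc) []

-- ===== PORT B =====
def pvSnippet (text : String) (keyword : String) (idx : Int) : String :=
  let start := max (0 : Int) (idx - 40)
  let stop := min ((text.toList.length : Int)) (idx + (keyword.toList.length : Int) + 40)
  let evidence := PySem.Chars.strip (PySem.Chars.slice text.toList (some start) (some stop))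
  let evidence := if start > 0 then ['.', '.', '.'] ++ evidence else evidence
  let evidence := if stop < (text.toList.length : Int) then evidence ++ ['.', '.', '.'] else evidence
  String.ofList evidence

-- Python's text_lower.startswith(k, i) with 0 ≤ i is startswith on the i-th suffix (exact on 0 ≤ i)
def pvScanLoop (tl : List Char) (is : List Nat) (first : PySem.Dict (List Char) Int)
    (pending : List (List Char)) : PySem.Dict (List Char) Int :=
  match is with
  | [] => first
  | i :: rest =>
    if pending.isEmpty then first
    else
      let hits := pending.filter (fun k => PySem.Chars.startswith (tl.drop i) k)
      let first' := hits.foldl (fun d k => d.insert k (i : Int)) first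
      let pending' := pending.filter (fun k => !PySem.Chars.startswith (tl.drop i) k)
      pvScanLoop tl rest first' pending'

def scan_text_for_keywords_py_alt (text : String) (keywords : List String) : List (String × String) :=
  let tl := PySem.Chars.lower text.toList
  let pending : PySem.Set (List Char) := PySem.Set.ofList (keywords.map (fun k => PySem.Chars.lower k.toList))
  let first := pvScanLoop tl (List.range (tl.length + 1)) PySem.Dict.empty pending
  keywords.foldl (fun out keyword =>
    match first.get? (PySem.Chars.lower keyword.toList) with
    | some idx => out ++ [(keyword, pvSnippet text keyword idx)]
    | none => out) []

-- ===== PRECONDITION & SPEC =====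
def Spec_scan_text_for_keywords_py (text : String) (keywords : List String) (out : List (String × String)) : Prop := out = scan_text_for_keywords_py_alt text keywords
instance (text : String) (keywords : List String) (out : List (String × String)) : Decidable (Spec_scan_text_for_keywords_py text keywords out) := by unfold Spec_scan_text_for_keywords_py; infer_instance

-- ===== CLAIM (what is proved, stated in full; the proofs are below) =====
def Claim_equal_scan_text_for_keywords_py : Prop := ∀ (text : String) (keywords : List String), Dom_scan_text_for_keywords_py text keywords → Spec_scan_text_for_keywords_py text keywords (scan_text_for_keywords_py text keywords)

-- ===== LEMMAS AND PROOFS =====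

theorem pv_get?_foldl_insert_not_mem {l : List (List Char)} {kl : List Char}
    (h : kl ∉ l) (d : PySem.Dict (List Char) Int) (v : Int) :
    (l.foldl (fun d k => d.insert k v) d).get? kl = d.get? kl := by
  induction l generalizing d with
  | nil => rfl
  | cons a t ih =>
    simp only [List.mem_cons, not_or] at h
    simp only [List.foldl_cons]
    rw [ih h.2, PySem.Dict.get?_insert_of_ne _ _ h.1]

theorem pv_get?_foldl_insert_mem {l : List (List Char)} {kl : List Char}
    (h : kl ∈ l) (hnd : l.Nodup) (d : PySem.Dict (List Char) Int) (v : Int) :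
    (l.foldl (fun d k => d.insert k v) d).get? kl = some v := by
  induction l generalizing d with
  | nil => cases h
  | cons a t ih =>
    simp only [List.foldl_cons]
    rcases List.mem_cons.mp h with rfl | hm
    · rw [pv_get?_foldl_insert_not_mem ((List.nodup_cons.mp hnd).1) _ v,
        PySem.Dict.get?_insert_self]
    · exact ih hm (List.Nodup.of_cons hnd) _

theorem pv_scanLoop_not_mem (tl : List Char) (is : List Nat)
    (first : PySem.Dict (List Char) Int) (pending : List (List Char)) {kl : List Char}
    (h : kl ∉ pending) :
    (pvScanLoop tl is first pending).get? kl = first.get? kl := by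
  induction is generalizing first pending with
  | nil => rfl
  | cons i rest ih =>
    rw [pvScanLoop]
    by_cases he : pending.isEmpty
    · simp [he]
    · rw [if_neg he]
      rw [ih _ _ (fun hm => h (List.mem_of_mem_filter hm))]
      exact pv_get?_foldl_insert_not_mem (fun hm => h (List.mem_of_mem_filter hm)) _ _

theorem pv_scanLoop_get (tl : List Char) (kl : List Char) :
    ∀ (m j : Nat) (first : PySem.Dict (List Char) Int) (pending : List (List Char)),
      kl ∈ pending → pending.Nodup →
      (pvScanLoop tl (List.range' j m) first pending).get? kl
        = if h : ∃ i, i < m ∧ kl <+: tl.drop (j + i)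
          then some ((j + Nat.find h : Nat) : Int) else first.get? kl := by
  intro m
  induction m with
  | zero =>
    intro j first pending _ _
    rw [dif_neg (by rintro ⟨i, hi, _⟩; omega)]
    rfl
  | succ m ih =>
    intro j first pending hmem hnd
    have hne : pending.isEmpty = false := by
      cases pending with
      | nil => cases hmem
      | cons a t => rfl
    rw [List.range'_succ, pvScanLoop]
    rw [if_neg (by simp [hne])]
    by_cases hmatch : kl <+: tl.drop j
    · have hhit : kl ∈ pending.filter (fun k => PySem.Chars.startswith (tl.drop j) k) := by
        refine List.mem_filter.mpr ⟨hmem, ?_⟩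
        exact (PySem.Chars.startswith_iff _ _).mpr hmatch
      have hnot : kl ∉ pending.filter (fun k => !PySem.Chars.startswith (tl.drop j) k) := by
        intro hm
        have := List.of_mem_filter hm
        rw [(PySem.Chars.startswith_iff _ _).mpr hmatch] at this
        exact absurd this (by decide)
      rw [pv_scanLoop_not_mem _ _ _ _ hnot,
        pv_get?_foldl_insert_mem hhit (List.Nodup.filter _ hnd) _ _]
      have hP : ∃ i, i < m + 1 ∧ kl <+: tl.drop (j + i) := ⟨0, by omega, by simpa using hmatch⟩
      rw [dif_pos hP, Nat.find_eq_zero hP |>.mpr ⟨by omega, by simpa using hmatch⟩]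
      norm_num
    · have hmem' : kl ∈ pending.filter (fun k => !PySem.Chars.startswith (tl.drop j) k) := by
        refine List.mem_filter.mpr ⟨hmem, ?_⟩
        have : PySem.Chars.startswith (tl.drop j) kl = false := by
          cases hsw : PySem.Chars.startswith (tl.drop j) kl
          · rfl
          · exact absurd ((PySem.Chars.startswith_iff _ _).mp hsw) hmatch
        simp [this]
      have hfirst' :
          ((pending.filter (fun k => PySem.Chars.startswith (tl.drop j) k)).foldl
            (fun d k => d.insert k (j : Int)) first).get? kl = first.get? kl := by
        refine pv_get?_foldl_insert_not_mem ?_ _ _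
        intro hm
        have := List.of_mem_filter hm
        exact hmatch ((PySem.Chars.startswith_iff _ _).mp this)
      rw [ih (j + 1) _ _ hmem' (List.Nodup.filter _ hnd)]
      by_cases hQ : ∃ i, i < m ∧ kl <+: tl.drop (j + 1 + i)
      · have hP : ∃ i, i < m + 1 ∧ kl <+: tl.drop (j + i) := by
          obtain ⟨i, hi, hp⟩ := hQ
          exact ⟨i + 1, by omega, by rwa [show j + (i + 1) = j + 1 + i by omega]⟩
        rw [dif_pos hQ, dif_pos hP]
        congr 2
        -- Nat.find hP = Nat.find hQ + 1
        have h0 : ¬ (0 < m + 1 ∧ kl <+: tl.drop (j + 0)) := by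
          rintro ⟨_, hp⟩; exact hmatch (by simpa using hp)
        have hfind : Nat.find hP = Nat.find hQ + 1 := by
          refine le_antisymm ?_ ?_
          · refine Nat.find_min' hP ?_
            obtain ⟨hlt, hp⟩ := Nat.find_spec hQ
            exact ⟨by omega, by rwa [show j + (Nat.find hQ + 1) = j + 1 + Nat.find hQ by omega]⟩
          · rcases Nat.find_spec hP with ⟨hlt, hp⟩
            cases hfp : Nat.find hP with
            | zero => exact absurd (hfp ▸ Nat.find_spec hP) h0
            | succ k =>
              have hjk : kl <+: tl.drop (j + 1 + k) := by
                rw [show j + 1 + k = j + (k + 1) by omega]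
                exact (hfp ▸ Nat.find_spec hP).2
              have := Nat.find_min' hQ ⟨by omega, hjk⟩
              omega
        omega
      · have hP : ¬ ∃ i, i < m + 1 ∧ kl <+: tl.drop (j + i) := by
          rintro ⟨i, hi, hp⟩
          cases i with
          | zero => exact hmatch (by simpa using hp)
          | succ k => exact hQ ⟨k, by omega, by rwa [show j + 1 + k = j + (k + 1) by omega]⟩
        rw [dif_neg hQ, dif_neg hP, hfirst']

theorem pv_first_get (tl : List Char) (kl : List Char) (pending : List (List Char))
    (hmem : kl ∈ pending) (hnd : pending.Nodup) :
    (pvScanLoop tl (List.range (tl.length + 1)) PySem.Dict.empty pending).get? kl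
      = if PySem.Chars.find tl kl = -1 then none else some (PySem.Chars.find tl kl) := by
  rw [List.range_eq_range', pv_scanLoop_get tl kl (tl.length + 1) 0 _ _ hmem hnd]
  by_cases hin : kl <:+: tl
  · have hnneg : 0 ≤ PySem.Chars.find tl kl := (PySem.Chars.find_nonneg_iff _ _).mpr hin
    obtain ⟨hpre, hmin⟩ := PySem.Chars.find_spec hnneg
    have hle : PySem.Chars.find tl kl ≤ tl.length := PySem.Chars.find_le_length tl kl
    set f := (PySem.Chars.find tl kl).toNat with hf
    have hP : ∃ i, i < tl.length + 1 ∧ kl <+: tl.drop (0 + i) :=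
      ⟨f, by omega, by simpa using hpre⟩
    rw [dif_pos hP]
    have hfind : Nat.find hP = f := by
      refine le_antisymm (Nat.find_min' hP ⟨by omega, by simpa using hpre⟩) ?_
      by_contra hlt
      rw [not_le] at hlt
      obtain ⟨_, hp⟩ := Nat.find_spec hP
      exact hmin (Nat.find hP) hlt (by simpa using hp)
    rw [if_neg (by rw [PySem.Chars.find_eq_neg_one_iff]; exact fun h => h hin)]
    rw [hfind]
    simp [hf, Int.toNat_of_nonneg hnneg]
  · rw [dif_neg, if_pos ((PySem.Chars.find_eq_neg_one_iff _ _).mpr hin)]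
    · rfl
    · rintro ⟨i, _, hp⟩
      exact hin (((PySem.Chars.exists_prefix_drop_iff_isIn kl tl).mp ⟨i, by simpa using hp⟩) |>
        (PySem.Chars.isIn_iff_infix kl tl).mp)

-- ===== VERDICT (by name: the statement is the Claim_ definition above) =====
theorem scan_text_for_keywords_py_spec : Claim_equal_scan_text_for_keywords_py := by
  intro text keywords _
  unfold Spec_scan_text_for_keywords_py
  simp only [scan_text_for_keywords_py, scan_text_for_keywords_py_alt]
  refine (PySem.List.foldl_congr_mem' _ _ _ _ ?_).symm
  intro kw hkw acc
  have hmem : PySem.Chars.lower kw.toList ∈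
      PySem.Set.ofList (keywords.map (fun k => PySem.Chars.lower k.toList)) := by
    rw [PySem.Set.mem_ofList]
    exact List.mem_map_of_mem hkw
  rw [pv_first_get _ _ _ hmem (PySem.Set.nodup_ofList _)]
  by_cases hfind : PySem.Chars.find (PySem.Chars.lower text.toList) (PySem.Chars.lower kw.toList) = -1
  · simp [hfind]
  · simp [hfind, pvSnippet]
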